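-- pv_equiv track=rewrite | github.com/LinuxBeginnings/Hyprland-Dots | config/hypr/scripts/keybinds_parser.py | _find_lua_block
-- ===== SOURCE A (Python) =====
-- def _find_lua_block(text, start_idx, open_char="{", close_char="}"):
--     depth = 0
--     in_string = None
--     escape = False
--     for idx in range(start_idx, len(text)):
--         ch = text[idx]
--         if in_string:
--             if escape:
--                 escape = False
--             elif ch == "\\":
--                 escape = True
--             elif ch == in_string:
--                 in_string = None
--             continue
--         if ch in ("'", '"'):
--             in_string = ch
--             continue
--         if ch == open_char:
--             depth += 1
--         elif ch == close_char:
--             depth -= 1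
--             if depth == 0:
--                 return text[start_idx + 1:idx], idx + 1
--     return None, None
-- ===== SOURCE B (Python) =====
-- def _find_lua_block(text, start_idx, open_char="{", close_char="}"):
--     n = len(text)
--
--     def skip_string(i, quote):
--         # consume a whole string literal; return index just past the closing
--         # quote, or None if it is unterminated
--         while i < n:
--             c = text[i]
--             if c == "\\":
--                 i += 2
--             elif c == quote:
--                 return i + 1
--             else:
--                 i += 1
--         return None
--
--     # pass 1: collect (index, char) of every position outside string literals
--     events = []
--     i = start_idx
--     while i < n:
--         ch = text[i]
--         if ch == "'" or ch == '"':
--             j = skip_string(i + 1, ch)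
--             if j is None:
--                 break
--             i = j
--         else:
--             events.append((i, ch))
--             i += 1
--
--     # pass 2: brace depth over the collected events only
--     depth = 0
--     for i, ch in events:
--         if ch == open_char:
--             depth += 1
--         elif ch == close_char:
--             depth -= 1
--             if depth == 0:
--                 return text[start_idx + 1:i], i + 1
--     return None, None
-- ===== Notes on version B (the rewrite author's own statement) =====
-- stated objective: alternative
-- what changed: Replaced A's single-pass three-flag state machine (depth/in_string/escape updated per character) with a staged two-pass design: pass 1 materializes the list of (index, char) events lying outside string literals (string literals are consumed wholesale by a skip_string helper), and pass 2 is a separate fold over that event list that only tracks brace depth.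
import Mathlib
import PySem

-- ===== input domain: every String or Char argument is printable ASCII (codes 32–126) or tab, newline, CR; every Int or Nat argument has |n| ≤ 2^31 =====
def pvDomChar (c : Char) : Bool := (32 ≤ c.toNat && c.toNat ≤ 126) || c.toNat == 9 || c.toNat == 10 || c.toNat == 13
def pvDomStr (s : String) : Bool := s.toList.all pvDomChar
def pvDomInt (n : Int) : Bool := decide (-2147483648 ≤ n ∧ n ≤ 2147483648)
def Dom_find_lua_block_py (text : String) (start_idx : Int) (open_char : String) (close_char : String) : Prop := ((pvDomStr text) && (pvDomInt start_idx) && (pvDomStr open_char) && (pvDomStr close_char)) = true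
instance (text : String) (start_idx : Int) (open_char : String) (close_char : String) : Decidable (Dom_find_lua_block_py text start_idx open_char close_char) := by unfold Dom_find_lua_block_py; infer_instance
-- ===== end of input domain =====

-- B replaces A's single-pass three-flag state machine by two staged passes: pass 1 builds the
-- list of (index, char) events outside string literals, pass 2 folds brace depth over that list
-- (objective: alternative decomposition, same cost).
-- Loops are ported on a Nat fuel of (len - idx) extra steps: the index advances by at least 1
-- per step, so the fuel-0 case is reached only with idx ≥ len, where the Python loop also stops.

-- ===== PORT A =====
-- A's for-idx-in-range(start_idx, len(text)) loop, state (depth, in_string, escape);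
-- pyGet? = none is Python's IndexError (start_idx < -len), excluded by Pre_.
def pvAGo (t : List Char) (oc cc : String) (si n : Int) :
    Nat → Int → Int → Option Char → Bool → Option String × Option Int
  | 0, _, _, _, _ => (none, none)
  | fuel + 1, idx, depth, instr, esc =>
    if idx < n then
      match PySem.List.pyGet? t idx with
      | none => (none, none)  -- IndexError in Python; outside Pre_
      | some ch =>
        match instr with
        | some q =>
          if esc then pvAGo t oc cc si n fuel (idx + 1) depth (some q) false
          else if ch = '\\' then pvAGo t oc cc si n fuel (idx + 1) depth (some q) true
          else if ch = q then pvAGo t oc cc si n fuel (idx + 1) depth none false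
          else pvAGo t oc cc si n fuel (idx + 1) depth (some q) false
        | none =>
          if ch = '\'' ∨ ch = '"' then pvAGo t oc cc si n fuel (idx + 1) depth (some ch) false
          else if String.ofList [ch] = oc then pvAGo t oc cc si n fuel (idx + 1) (depth + 1) none false
          else if String.ofList [ch] = cc then
            if depth - 1 = 0 then
              (some (String.ofList (PySem.List.slice t (some (si + 1)) (some idx))), some (idx + 1))
            else pvAGo t oc cc si n fuel (idx + 1) (depth - 1) none false
          else pvAGo t oc cc si n fuel (idx + 1) depth none false
    else (none, none)

def find_lua_block_py (text : String) (start_idx : Int) (open_char : String) (close_char : String) : Option String × Option Int :=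
  pvAGo text.toList open_char close_char start_idx (text.toList.length : Int)
    ((text.toList.length : Int) - start_idx).toNat start_idx 0 none false

-- ===== PORT B =====
-- B's skip_string helper: consume a whole string literal from index i;
-- some j = index just past the closing quote, none = unterminated.
def pvSkipStr (t : List Char) (q : Char) (n : Int) : Nat → Int → Option Int
  | 0, _ => none
  | fuel + 1, i =>
    if i < n then
      match PySem.List.pyGet? t i with
      | none => none  -- IndexError in Python; outside Pre_
      | some c =>
        if c = '\\' then pvSkipStr t q n fuel (i + 2)
        else if c = q then some (i + 1)
        else pvSkipStr t q n fuel (i + 1)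
    else none

-- B's pass 1: the (index, char) events outside string literals.
def pvEvents (t : List Char) (n : Int) : Nat → Int → List (Int × Char)
  | 0, _ => []
  | fuel + 1, i =>
    if i < n then
      match PySem.List.pyGet? t i with
      | none => []  -- IndexError in Python; outside Pre_
      | some ch =>
        if ch = '\'' ∨ ch = '"' then
          match pvSkipStr t ch n fuel (i + 1) with
          | none => []
          | some j => pvEvents t n fuel j
        else (i, ch) :: pvEvents t n fuel (i + 1)
    else []

-- B's pass 2: fold brace depth over the event list (structural, no fuel).
def pvScan (t : List Char) (oc cc : String) (si : Int) :
    List (Int × Char) → Int → Option String × Option Int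
  | [], _ => (none, none)
  | (i, ch) :: rest, depth =>
    if String.ofList [ch] = oc then pvScan t oc cc si rest (depth + 1)
    else if String.ofList [ch] = cc then
      if depth - 1 = 0 then
        (some (String.ofList (PySem.List.slice t (some (si + 1)) (some i))), some (i + 1))
      else pvScan t oc cc si rest (depth - 1)
    else pvScan t oc cc si rest depth

def find_lua_block_py_alt (text : String) (start_idx : Int) (open_char : String) (close_char : String) : Option String × Option Int :=
  pvScan text.toList open_char close_char start_idx
    (pvEvents text.toList (text.toList.length : Int)
      ((text.toList.length : Int) - start_idx).toNat start_idx) 0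

-- ===== PRECONDITION & SPEC =====
-- Pre_ excludes exactly the inputs where Python A raises IndexError (start_idx < -len(text),
-- so the first text[idx] is out of range); Python B raises there too.
def Pre_find_lua_block_py (text : String) (start_idx : Int) (open_char : String) (close_char : String) : Prop :=
  -(text.toList.length : Int) ≤ start_idx
instance (text : String) (start_idx : Int) (open_char : String) (close_char : String) : Decidable (Pre_find_lua_block_py text start_idx open_char close_char) := by unfold Pre_find_lua_block_py; infer_instance

def pvWitness_find_lua_block_py : String × Int × String × String := ("f = { a = 'x}' }", 4, "{", "}")

def Spec_find_lua_block_py (text : String) (start_idx : Int) (open_char : String) (close_char : String) (out : Option String × Option Int) : Prop := out = find_lua_block_py_alt text start_idx open_char close_char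
instance (text : String) (start_idx : Int) (open_char : String) (close_char : String) (out : Option String × Option Int) : Decidable (Spec_find_lua_block_py text start_idx open_char close_char out) := by unfold Spec_find_lua_block_py; infer_instance

-- ===== CLAIM =====
def Claim_equal_find_lua_block_py : Prop := ∀ (text : String) (start_idx : Int) (open_char : String) (close_char : String), Dom_find_lua_block_py text start_idx open_char close_char → Pre_find_lua_block_py text start_idx open_char close_char → Spec_find_lua_block_py text start_idx open_char close_char (find_lua_block_py text start_idx open_char close_char)

-- ===== LEMMAS AND PROOFS =====

lemma pvGet_some (t : List Char) (i : Int) (h1 : -(t.length : Int) ≤ i) (h2 : i < (t.length : Int)) :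
    ∃ c, PySem.List.pyGet? t i = some c := by
  cases hg : PySem.List.pyGet? t i with
  | some c => exact ⟨c, rfl⟩
  | none =>
    rw [PySem.List.pyGet?_eq_none_iff] at hg
    exact absurd (by constructor <;> omega) hg

-- loops are already done at idx ≥ len, whatever fuel is left
lemma pvAGo_done (t : List Char) (oc cc : String) (si n : Int) (f : Nat) (idx depth : Int)
    (instr : Option Char) (esc : Bool) (h : ¬ idx < n) :
    pvAGo t oc cc si n f idx depth instr esc = (none, none) := by
  cases f <;> simp [pvAGo, h]

lemma pvSkipStr_done (t : List Char) (q : Char) (n : Int) (f : Nat) (i : Int)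
    (h : ¬ i < n) : pvSkipStr t q n f i = none := by
  cases f <;> simp [pvSkipStr, h]

lemma pvEvents_done (t : List Char) (n : Int) (f : Nat) (i : Int)
    (h : ¬ i < n) : pvEvents t n f i = [] := by
  cases f <;> simp [pvEvents, h]

-- the simulation: A's state machine at (instr = none) equals folding pass 2 over the pass-1
-- events from idx with accumulator depth; at (instr = some q, esc = false) it equals skipping
-- the rest of the string literal and resuming; fuels are arbitrary above (len - idx) steps
lemma pvMain (t : List Char) (oc cc : String) (si : Int) (hsi : -(t.length : Int) ≤ si) :
    ∀ (k : Nat) (idx depth : Int), ((t.length : Int) - idx).toNat = k → si ≤ idx →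
      (∀ (fa fe : Nat), (t.length : Int) - idx ≤ (fa : Int) → (t.length : Int) - idx ≤ (fe : Int) →
        pvAGo t oc cc si (t.length : Int) fa idx depth none false
          = pvScan t oc cc si (pvEvents t (t.length : Int) fe idx) depth) ∧
      (∀ (q : Char) (fa fs fe : Nat),
        (t.length : Int) - idx ≤ (fa : Int) → (t.length : Int) - idx ≤ (fs : Int) →
        (t.length : Int) - idx - 1 ≤ (fe : Int) →
        pvAGo t oc cc si (t.length : Int) fa idx depth (some q) false
          = (match pvSkipStr t q (t.length : Int) fs idx with
             | none => ((none : Option String), (none : Option Int))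
             | some j => pvScan t oc cc si (pvEvents t (t.length : Int) fe j) depth)) := by
  intro k
  induction k using Nat.strong_induction_on with
  | _ k ih =>
    intro idx depth hk hidx
    by_cases hlt : idx < (t.length : Int)
    · obtain ⟨ch, hch⟩ := pvGet_some t idx (by omega) hlt
      constructor
      · -- part (a): instr = none  vs  pass-1 events head at idx
        intro fa fe hfa hfe
        obtain ⟨fa', rfl⟩ : ∃ m, fa = m + 1 := ⟨fa - 1, by omega⟩
        obtain ⟨fe', rfl⟩ : ∃ m, fe = m + 1 := ⟨fe - 1, by omega⟩
        rw [pvAGo, pvEvents]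
        simp only [if_pos hlt, hch]
        by_cases hq : ch = '\'' ∨ ch = '"'
        · simp only [if_pos hq]
          rw [(ih _ (by omega) (idx + 1) depth rfl (by omega)).2 ch fa' fe' fe'
            (by omega) (by omega) (by omega)]
          cases pvSkipStr t ch (t.length : Int) fe' (idx + 1) with
          | none => rw [pvScan]
          | some j => rfl
        · simp only [if_neg hq]
          rw [pvScan]
          by_cases hoc : String.ofList [ch] = oc
          · simp only [if_pos hoc]
            exact (ih _ (by omega) (idx + 1) (depth + 1) rfl (by omega)).1 fa' fe'
              (by omega) (by omega)
          · simp only [if_neg hoc]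
            by_cases hcc : String.ofList [ch] = cc
            · simp only [if_pos hcc]
              by_cases hd : depth - 1 = 0
              · simp [hd]
              · simp only [if_neg hd]
                exact (ih _ (by omega) (idx + 1) (depth - 1) rfl (by omega)).1 fa' fe'
                  (by omega) (by omega)
            · simp only [if_neg hcc]
              exact (ih _ (by omega) (idx + 1) depth rfl (by omega)).1 fa' fe'
                (by omega) (by omega)
      · -- part (b): instr = some q, esc = false  vs  skip_string at idx
        intro q fa fs fe hfa hfs hfe
        obtain ⟨fa', rfl⟩ : ∃ m, fa = m + 1 := ⟨fa - 1, by omega⟩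
        obtain ⟨fs', rfl⟩ : ∃ m, fs = m + 1 := ⟨fs - 1, by omega⟩
        rw [pvAGo, pvSkipStr]
        simp only [if_pos hlt, hch, Bool.false_eq_true, if_false]
        by_cases hbs : ch = '\\'
        · -- backslash: A makes two single steps (set escape, consume next); B jumps by 2
          simp only [if_pos hbs]
          by_cases hlt1 : idx + 1 < (t.length : Int)
          · obtain ⟨fa'', rfl⟩ : ∃ m, fa' = m + 1 := ⟨fa' - 1, by omega⟩
            obtain ⟨ch', hch'⟩ := pvGet_some t (idx + 1) (by omega) (by omega)
            rw [pvAGo]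
            have e2 : idx + 1 + 1 = idx + 2 := by ring
            simp only [if_pos hlt1, hch', if_true, e2]
            exact (ih _ (by omega) (idx + 2) depth rfl (by omega)).2 q fa'' fs' fe
              (by omega) (by omega) (by omega)
          · rw [pvAGo_done t oc cc si _ fa' (idx + 1) depth (some q) true hlt1,
                pvSkipStr_done t q _ fs' (idx + 2) (by omega)]
        · simp only [if_neg hbs]
          by_cases hqq : ch = q
          · simp only [if_pos hqq]
            exact (ih _ (by omega) (idx + 1) depth rfl (by omega)).1 fa' fe
              (by omega) (by omega)
          · simp only [if_neg hqq]
            exact (ih _ (by omega) (idx + 1) depth rfl (by omega)).2 q fa' fs' fe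
              (by omega) (by omega) (by omega)
    · constructor
      · intro fa fe _ _
        rw [pvAGo_done t oc cc si _ fa idx depth none false hlt,
            pvEvents_done t _ fe idx hlt, pvScan]
      · intro q fa fs fe _ _ _
        rw [pvAGo_done t oc cc si _ fa idx depth (some q) false hlt,
            pvSkipStr_done t q _ fs idx hlt]

-- ===== VERDICT =====
theorem find_lua_block_py_spec : Claim_equal_find_lua_block_py := by
  intro text start_idx oc cc _hdom hpre
  unfold Spec_find_lua_block_py find_lua_block_py find_lua_block_py_alt
  exact (pvMain text.toList oc cc start_idx hpre _ start_idx 0 rfl le_rfl).1 _ _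
    (by omega) (by omega)
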